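-- pv_equiv track=rewrite | github.com/SmartSparkCoding/hackanomoly-bot | nephthys/views/home/stats.py | _get_milestone_status
-- ===== SOURCE A (Python) =====
-- def _get_milestone_status(current_count: int) -> str:
--     """Generate a string showing which milestones have been reached."""
--     RSVP_GOALS = [80, 90, 100, 115, 130, 150, 300]
--     lines = []
--     for goal in RSVP_GOALS:
--         if current_count >= goal:
--             lines.append(f":white_check_mark: {goal}")
--         else:
--             lines.append(f":white_circle: {goal}")
--     return " ".join(lines)
-- ===== SOURCE B (Python) =====
-- def _get_milestone_status(current_count: int) -> str:
--     """Generate a string showing which milestones have been reached."""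
--     RSVP_GOALS = [80, 90, 100, 115, 130, 150, 300]
--     # binary search (bisect_right): number of goals <= current_count
--     lo, hi = 0, len(RSVP_GOALS)
--     while lo < hi:
--         mid = (lo + hi) // 2
--         if current_count < RSVP_GOALS[mid]:
--             hi = mid
--         else:
--             lo = mid + 1
--     k = lo
--     reached = [f":white_check_mark: {g}" for g in RSVP_GOALS[:k]]
--     pending = [f":white_circle: {g}" for g in RSVP_GOALS[k:]]
--     return " ".join(reached + pending)
-- ===== Notes on version B (the rewrite author's own statement) =====
-- stated objective: alternative
-- what changed: B replaces the per-goal comparison loop with a hand-written bisect_right binary search on the sorted goal list, then builds the output by slicing into a reached prefix and a pending suffix.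
import Mathlib
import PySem

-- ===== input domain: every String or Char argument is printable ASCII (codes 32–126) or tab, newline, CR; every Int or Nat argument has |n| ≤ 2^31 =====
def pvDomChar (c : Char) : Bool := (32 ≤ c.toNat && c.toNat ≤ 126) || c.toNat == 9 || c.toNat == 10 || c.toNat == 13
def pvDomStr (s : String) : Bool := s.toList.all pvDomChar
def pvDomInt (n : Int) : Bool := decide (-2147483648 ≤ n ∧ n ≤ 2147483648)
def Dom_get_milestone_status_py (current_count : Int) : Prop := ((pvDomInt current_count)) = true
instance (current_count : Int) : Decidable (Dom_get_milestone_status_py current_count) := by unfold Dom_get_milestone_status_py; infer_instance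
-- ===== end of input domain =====

-- B replaces A's per-goal comparison loop with a bisect_right binary search plus slicing; alternative structure, same result.

-- ===== PORT A =====
def get_milestone_status_py (current_count : Int) : String :=
  let RSVP_GOALS : List Int := [80, 90, 100, 115, 130, 150, 300]
  let lines := RSVP_GOALS.foldl (fun acc goal =>
    if current_count ≥ goal then
      acc ++ [":white_check_mark: " ++ PySem.Int.toStr goal]
    else
      acc ++ [":white_circle: " ++ PySem.Int.toStr goal]) []
  PySem.Str.join " " lines

-- ===== PORT B =====
-- binary-search loop of Source B; xs[mid] is always in range, so getD's default is never used
def pvBisectLoop (xs : List Int) (x : Int) (lo hi : Nat) : Nat :=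
  if h : lo < hi then
    let mid := (lo + hi) / 2
    if x < xs.getD mid 0 then
      pvBisectLoop xs x lo mid
    else
      pvBisectLoop xs x (mid + 1) hi
  else
    lo
termination_by hi - lo
decreasing_by all_goals omega

def get_milestone_status_py_alt (current_count : Int) : String :=
  let RSVP_GOALS : List Int := [80, 90, 100, 115, 130, 150, 300]
  let k := pvBisectLoop RSVP_GOALS current_count 0 RSVP_GOALS.length
  let reached := (RSVP_GOALS.take k).map (fun g => ":white_check_mark: " ++ PySem.Int.toStr g)
  let pending := (RSVP_GOALS.drop k).map (fun g => ":white_circle: " ++ PySem.Int.toStr g)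
  PySem.Str.join " " (reached ++ pending)

-- ===== PRECONDITION & SPEC =====
def Spec_get_milestone_status_py (current_count : Int) (out : String) : Prop := out = get_milestone_status_py_alt current_count
instance (current_count : Int) (out : String) : Decidable (Spec_get_milestone_status_py current_count out) := by unfold Spec_get_milestone_status_py; infer_instance

-- ===== CLAIM (what is proved, stated in full; the proofs are below) =====
def Claim_equal_get_milestone_status_py : Prop := ∀ (current_count : Int), Dom_get_milestone_status_py current_count → Spec_get_milestone_status_py current_count (get_milestone_status_py current_count)

-- ===== LEMMAS AND PROOFS =====

-- ===== VERDICT (by name: the statement is the Claim_ definition above) =====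
theorem get_milestone_status_py_spec : Claim_equal_get_milestone_status_py := by
  intro c _
  unfold Spec_get_milestone_status_py
  by_cases h80 : c < 80
  · simp [get_milestone_status_py, get_milestone_status_py_alt, pvBisectLoop, List.getD,
      (show ¬(c ≥ (80:Int)) by omega),
      (show c < (80:Int) by omega),
      (show ¬(c ≥ (90:Int)) by omega),
      (show c < (90:Int) by omega),
      (show ¬(c ≥ (100:Int)) by omega),
      (show c < (100:Int) by omega),
      (show ¬(c ≥ (115:Int)) by omega),
      (show c < (115:Int) by omega),
      (show ¬(c ≥ (130:Int)) by omega),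
      (show c < (130:Int) by omega),
      (show ¬(c ≥ (150:Int)) by omega),
      (show c < (150:Int) by omega),
      (show ¬(c ≥ (300:Int)) by omega),
      (show c < (300:Int) by omega)]
  by_cases h90 : c < 90
  · simp [get_milestone_status_py, get_milestone_status_py_alt, pvBisectLoop, List.getD,
      (show c ≥ (80:Int) by omega),
      (show ¬(c < (80:Int)) by omega),
      (show ¬(c ≥ (90:Int)) by omega),
      (show c < (90:Int) by omega),
      (show ¬(c ≥ (100:Int)) by omega),
      (show c < (100:Int) by omega),
      (show ¬(c ≥ (115:Int)) by omega),
      (show c < (115:Int) by omega),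
      (show ¬(c ≥ (130:Int)) by omega),
      (show c < (130:Int) by omega),
      (show ¬(c ≥ (150:Int)) by omega),
      (show c < (150:Int) by omega),
      (show ¬(c ≥ (300:Int)) by omega),
      (show c < (300:Int) by omega)]
  by_cases h100 : c < 100
  · simp [get_milestone_status_py, get_milestone_status_py_alt, pvBisectLoop, List.getD,
      (show c ≥ (80:Int) by omega),
      (show ¬(c < (80:Int)) by omega),
      (show c ≥ (90:Int) by omega),
      (show ¬(c < (90:Int)) by omega),
      (show ¬(c ≥ (100:Int)) by omega),
      (show c < (100:Int) by omega),
      (show ¬(c ≥ (115:Int)) by omega),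
      (show c < (115:Int) by omega),
      (show ¬(c ≥ (130:Int)) by omega),
      (show c < (130:Int) by omega),
      (show ¬(c ≥ (150:Int)) by omega),
      (show c < (150:Int) by omega),
      (show ¬(c ≥ (300:Int)) by omega),
      (show c < (300:Int) by omega)]
  by_cases h115 : c < 115
  · simp [get_milestone_status_py, get_milestone_status_py_alt, pvBisectLoop, List.getD,
      (show c ≥ (80:Int) by omega),
      (show ¬(c < (80:Int)) by omega),
      (show c ≥ (90:Int) by omega),
      (show ¬(c < (90:Int)) by omega),
      (show c ≥ (100:Int) by omega),
      (show ¬(c < (100:Int)) by omega),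
      (show ¬(c ≥ (115:Int)) by omega),
      (show c < (115:Int) by omega),
      (show ¬(c ≥ (130:Int)) by omega),
      (show c < (130:Int) by omega),
      (show ¬(c ≥ (150:Int)) by omega),
      (show c < (150:Int) by omega),
      (show ¬(c ≥ (300:Int)) by omega),
      (show c < (300:Int) by omega)]
  by_cases h130 : c < 130
  · simp [get_milestone_status_py, get_milestone_status_py_alt, pvBisectLoop, List.getD,
      (show c ≥ (80:Int) by omega),
      (show ¬(c < (80:Int)) by omega),
      (show c ≥ (90:Int) by omega),
      (show ¬(c < (90:Int)) by omega),
      (show c ≥ (100:Int) by omega),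
      (show ¬(c < (100:Int)) by omega),
      (show c ≥ (115:Int) by omega),
      (show ¬(c < (115:Int)) by omega),
      (show ¬(c ≥ (130:Int)) by omega),
      (show c < (130:Int) by omega),
      (show ¬(c ≥ (150:Int)) by omega),
      (show c < (150:Int) by omega),
      (show ¬(c ≥ (300:Int)) by omega),
      (show c < (300:Int) by omega)]
  by_cases h150 : c < 150
  · simp [get_milestone_status_py, get_milestone_status_py_alt, pvBisectLoop, List.getD,
      (show c ≥ (80:Int) by omega),
      (show ¬(c < (80:Int)) by omega),
      (show c ≥ (90:Int) by omega),
      (show ¬(c < (90:Int)) by omega),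
      (show c ≥ (100:Int) by omega),
      (show ¬(c < (100:Int)) by omega),
      (show c ≥ (115:Int) by omega),
      (show ¬(c < (115:Int)) by omega),
      (show c ≥ (130:Int) by omega),
      (show ¬(c < (130:Int)) by omega),
      (show ¬(c ≥ (150:Int)) by omega),
      (show c < (150:Int) by omega),
      (show ¬(c ≥ (300:Int)) by omega),
      (show c < (300:Int) by omega)]
  by_cases h300 : c < 300
  · simp [get_milestone_status_py, get_milestone_status_py_alt, pvBisectLoop, List.getD,
      (show c ≥ (80:Int) by omega),
      (show ¬(c < (80:Int)) by omega),
      (show c ≥ (90:Int) by omega),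
      (show ¬(c < (90:Int)) by omega),
      (show c ≥ (100:Int) by omega),
      (show ¬(c < (100:Int)) by omega),
      (show c ≥ (115:Int) by omega),
      (show ¬(c < (115:Int)) by omega),
      (show c ≥ (130:Int) by omega),
      (show ¬(c < (130:Int)) by omega),
      (show c ≥ (150:Int) by omega),
      (show ¬(c < (150:Int)) by omega),
      (show ¬(c ≥ (300:Int)) by omega),
      (show c < (300:Int) by omega)]
  · simp [get_milestone_status_py, get_milestone_status_py_alt, pvBisectLoop, List.getD,
      (show c ≥ (80:Int) by omega),
      (show ¬(c < (80:Int)) by omega),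
      (show c ≥ (90:Int) by omega),
      (show ¬(c < (90:Int)) by omega),
      (show c ≥ (100:Int) by omega),
      (show ¬(c < (100:Int)) by omega),
      (show c ≥ (115:Int) by omega),
      (show ¬(c < (115:Int)) by omega),
      (show c ≥ (130:Int) by omega),
      (show ¬(c < (130:Int)) by omega),
      (show c ≥ (150:Int) by omega),
      (show ¬(c < (150:Int)) by omega),
      (show c ≥ (300:Int) by omega),
      (show ¬(c < (300:Int)) by omega)]
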